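-- pv_equiv track=rewrite | github.com/yuhee97/Programmers-Algorithm | level3/최고의집합lv3.py | solution
-- ===== SOURCE A (Python) =====
-- def solution(n, s):
--     if n > s:
--         return [-1]
--     result = []
--     while s != 0:
--         mod = s // n
--         result.append(mod)
--         n -= 1
--         s -= mod
--     return result
-- ===== SOURCE B (Python) =====
-- def solution(n, s):
--     if n > s:
--         return [-1]
--     if s == 0:
--         return []
--     q, r = divmod(s, n)
--     return [q] * (n - r) + [q + 1] * r
-- ===== Notes on version B (the rewrite author's own statement) =====
-- stated objective: simpler
-- what changed: Replaces the element-by-element running-division loop with a closed-form divmod partition: n-r copies of q followed by r copies of q+1.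
import Mathlib
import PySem

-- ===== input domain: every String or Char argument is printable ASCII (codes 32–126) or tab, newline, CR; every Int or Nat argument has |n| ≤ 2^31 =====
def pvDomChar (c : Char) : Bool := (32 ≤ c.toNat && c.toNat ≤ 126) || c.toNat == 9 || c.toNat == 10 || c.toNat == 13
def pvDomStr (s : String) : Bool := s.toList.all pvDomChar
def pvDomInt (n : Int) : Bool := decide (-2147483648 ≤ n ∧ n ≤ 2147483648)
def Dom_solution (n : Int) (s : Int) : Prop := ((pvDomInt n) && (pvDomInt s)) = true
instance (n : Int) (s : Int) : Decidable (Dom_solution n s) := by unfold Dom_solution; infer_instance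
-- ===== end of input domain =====

-- B replaces A's running-division loop by the closed-form divmod partition (simpler; return value only).

-- ===== PORT A =====
-- A's while loop; fuel = n.toNat suffices: on every input admitted by Pre_solution the
-- loop either never runs (s = 0) or runs exactly n times (1 ≤ n ≤ s).
def solutionLoop (fuel : Nat) (n s : Int) (acc : List Int) : List Int :=
  match fuel with
  | 0 => acc
  | f + 1 =>
    if s ≠ 0 then
      let mod := PySem.Int.floordiv s n
      solutionLoop f (n - 1) (s - mod) (acc ++ [mod])
    else acc

def solution (n : Int) (s : Int) : List Int :=
  if n > s then [-1]
  else solutionLoop n.toNat n s []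

-- ===== PORT B =====
def solution_alt (n : Int) (s : Int) : List Int :=
  if n > s then [-1]
  else if s = 0 then []
  else
    let q := PySem.Int.floordiv s n
    let r := PySem.Int.mod s n
    List.replicate (n - r).toNat q ++ List.replicate r.toNat (q + 1)

-- ===== PRECONDITION & SPEC =====
-- Pre_ excludes exactly the inputs where A does not return: n = 0 < s raises
-- ZeroDivisionError and n < 0 with s ≠ 0 makes the while loop diverge.
def Pre_solution (n : Int) (s : Int) : Prop := n > s ∨ s = 0 ∨ 1 ≤ n
instance (n : Int) (s : Int) : Decidable (Pre_solution n s) := by unfold Pre_solution; infer_instance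
def pvWitness_solution : Int × Int := (3, 7)

def Spec_solution (n : Int) (s : Int) (out : List Int) : Prop := out = solution_alt n s
instance (n : Int) (s : Int) (out : List Int) : Decidable (Spec_solution n s out) := by unfold Spec_solution; infer_instance

-- ===== CLAIM (what is proved, stated in full; the proofs are below) =====
def Claim_equal_solution : Prop := ∀ (n : Int) (s : Int), Dom_solution n s → Pre_solution n s → Spec_solution n s (solution n s)

-- ===== LEMMAS AND PROOFS =====

-- Core invariant: with 1 ≤ n ≤ s and fuel n.toNat, the loop produces the divmod partition.
theorem solutionLoop_closed (k : Nat) : ∀ (n s : Int) (acc : List Int),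
    n = (k : Int) + 1 → n ≤ s →
    solutionLoop n.toNat n s acc =
      acc ++ List.replicate (n - PySem.Int.mod s n).toNat (PySem.Int.floordiv s n)
          ++ List.replicate (PySem.Int.mod s n).toNat (PySem.Int.floordiv s n + 1) := by
  induction k with
  | zero =>
    intro n s acc hn hs
    have hs0 : s ≠ 0 := by omega
    have hone : n = 1 := by omega
    subst hone
    simp only [solutionLoop, Int.toNat_one]
    rw [if_pos hs0]
    simp
  | succ k ih =>
    intro n s acc hn hs
    have hn2 : (2 : Int) ≤ n := by omega
    have hpos : (0 : Int) < n := by omega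
    have hs0 : s ≠ 0 := by omega
    set q := PySem.Int.floordiv s n with hq
    set r := PySem.Int.mod s n with hr
    have hqr : q * n + r = s := PySem.Int.floordiv_mul_add_mod s n
    have hr0 : 0 ≤ r := PySem.Int.mod_nonneg s hpos
    have hrn : r < n := PySem.Int.mod_lt s hpos
    have hq1 : 1 ≤ q := by
      rw [hq, PySem.Int.le_floordiv_iff_mul_le hpos]; omega
    -- unfold one loop step
    have hfuel : n.toNat = (k + 1) + 1 := by omega
    have hn1 : n - 1 = (k : Int) + 1 := by omega
    have hfuel' : (n - 1).toNat = k + 1 := by omega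
    have hstep : solutionLoop n.toNat n s acc = solutionLoop (k + 1) (n - 1) (s - q) (acc ++ [q]) := by
      rw [hfuel]
      simp only [solutionLoop]
      rw [if_pos hs0, ← hq]
    rw [hstep, ← hfuel']
    -- two cases on the remainder at the next step
    by_cases hcase : r = n - 1
    · -- s - q = (q+1)(n-1): quotient q+1, remainder 0
      have hq' : PySem.Int.floordiv (s - q) (n - 1) = q + 1 := by
        rw [PySem.Int.floordiv_eq_iff_of_pos (by omega : (0:Int) < n - 1)]
        constructor <;> nlinarith
      have hr' : PySem.Int.mod (s - q) (n - 1) = 0 := by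
        have := PySem.Int.floordiv_mul_add_mod (s - q) (n - 1)
        rw [hq'] at this; nlinarith
      have hle : n - 1 ≤ s - q := by nlinarith
      rw [ih (n - 1) (s - q) (acc ++ [q]) hn1 hle, hq', hr']
      have h1 : (n - r).toNat = 1 := by omega
      have h2 : (n - 1 - 0).toNat = r.toNat := by omega
      rw [h1, h2, hcase]
      simp [List.replicate_succ]
    · -- r < n - 1: quotient stays q, remainder stays r
      have hrlt : r < n - 1 := by omega
      have hq' : PySem.Int.floordiv (s - q) (n - 1) = q := by
        rw [PySem.Int.floordiv_eq_iff_of_pos (by omega : (0:Int) < n - 1)]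
        constructor <;> nlinarith
      have hr' : PySem.Int.mod (s - q) (n - 1) = r := by
        have := PySem.Int.floordiv_mul_add_mod (s - q) (n - 1)
        rw [hq'] at this; nlinarith
      have hle : n - 1 ≤ s - q := by nlinarith
      rw [ih (n - 1) (s - q) (acc ++ [q]) hn1 hle, hq', hr']
      have h1 : (n - r).toNat = (n - 1 - r).toNat + 1 := by omega
      simp [h1, List.replicate_succ]

-- ===== VERDICT (by name: the statement is the Claim_ definition above) =====
theorem solution_spec : Claim_equal_solution := by
  intro n s _hdom hpre
  unfold Spec_solution solution solution_alt
  by_cases hgt : n > s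
  · simp [hgt]
  · rw [if_neg hgt, if_neg hgt]
    by_cases hs0 : s = 0
    · subst hs0
      have hn0 : n ≤ 0 := by omega
      have : n.toNat = 0 := by omega
      simp [this, solutionLoop]
    · have hn1 : 1 ≤ n := by rcases hpre with h | h | h <;> omega
      obtain ⟨k, hk⟩ : ∃ k : Nat, n = (k : Int) + 1 := ⟨(n - 1).toNat, by omega⟩
      rw [if_neg hs0]
      rw [solutionLoop_closed k n s [] hk (by omega)]
      simp
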